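-- pv_equiv track=rewrite | github.com/vikasgargbear/pharma-backend | api/core/database_migration.py | _types_compatible
-- ===== SOURCE A (Python) =====
-- def _types_compatible(db_type: str, model_type: str) -> bool:
--     """Check if database type and model type are compatible"""
--     # Normalize types
--     db_type = db_type.upper()
--     model_type = model_type.upper()
--
--     # Direct match
--     if db_type == model_type:
--         return True
--
--     # Common equivalences
--     equivalences = [
--         ('VARCHAR', 'STRING'),
--         ('TEXT', 'STRING'),
--         ('TIMESTAMP', 'DATETIME'),
--         ('DECIMAL', 'NUMERIC'),
--         ('SERIAL', 'INTEGER'),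
--         ('BIGSERIAL', 'BIGINT')
--     ]
--
--     for equiv in equivalences:
--         if (db_type in equiv and model_type in equiv) or \
--            (any(t in db_type for t in equiv) and any(t in model_type for t in equiv)):
--             return True
--
--     return False
-- ===== SOURCE B (Python) =====
-- def _types_compatible(db_type: str, model_type: str) -> bool:
--     """Check if database type and model type are compatible"""
--     db_type = db_type.upper()
--     model_type = model_type.upper()
--
--     if db_type == model_type:
--         return True
--
--     equivalences = [
--         ('VARCHAR', 'STRING'),
--         ('TEXT', 'STRING'),
--         ('TIMESTAMP', 'DATETIME'),
--         ('DECIMAL', 'NUMERIC'),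
--         ('SERIAL', 'INTEGER'),
--         ('BIGSERIAL', 'BIGINT')
--     ]
--
--     db_groups = {i for i, pair in enumerate(equivalences)
--                  if any(t in db_type for t in pair)}
--     model_groups = {i for i, pair in enumerate(equivalences)
--                     if any(t in model_type for t in pair)}
--     return bool(db_groups & model_groups)
-- ===== Notes on version B (the rewrite author's own statement) =====
-- stated objective: alternative
-- what changed: Replaces A's per-pair loop with early return and its nested (membership-and)-or-(substring-any-and) condition by two independent group-index set comprehensions (one membership pass per argument) combined with a single set-intersection truthiness test; the redundant tuple-equality disjunct disappears.
import Mathlib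
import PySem

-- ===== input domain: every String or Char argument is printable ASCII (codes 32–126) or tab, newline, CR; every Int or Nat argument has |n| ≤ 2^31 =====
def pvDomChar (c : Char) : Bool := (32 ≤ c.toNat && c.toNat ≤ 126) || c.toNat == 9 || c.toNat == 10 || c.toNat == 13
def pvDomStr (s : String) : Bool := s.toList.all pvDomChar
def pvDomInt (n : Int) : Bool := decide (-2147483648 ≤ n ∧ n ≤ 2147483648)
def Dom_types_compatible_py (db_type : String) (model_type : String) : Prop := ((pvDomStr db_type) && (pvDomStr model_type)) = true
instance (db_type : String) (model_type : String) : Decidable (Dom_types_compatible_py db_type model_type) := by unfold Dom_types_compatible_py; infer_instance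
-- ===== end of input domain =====

-- B replaces A's nested per-pair conjunction loop with two independent group-index
-- set comprehensions and a single set-intersection test (objective: alternative decomposition).


-- ===== PORT A =====
-- the literal list of common equivalences from A (B uses the same literal)
def tcEquivalences : List (String × String) :=
  [("VARCHAR", "STRING"), ("TEXT", "STRING"), ("TIMESTAMP", "DATETIME"),
   ("DECIMAL", "NUMERIC"), ("SERIAL", "INTEGER"), ("BIGSERIAL", "BIGINT")]

-- A's 'for equiv in equivalences: if …: return True' loop, one pair at a time
def tcLoop (db mt : String) : List (String × String) → Bool
  | [] => false
  | (a, b) :: rest =>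
    if ((db == a || db == b) && (mt == a || mt == b))
       || (([a, b].any (fun t => PySem.Str.isIn t db)) && ([a, b].any (fun t => PySem.Str.isIn t mt)))
    then true
    else tcLoop db mt rest

def types_compatible_py (db_type : String) (model_type : String) : Bool :=
  let db := PySem.Str.upper db_type
  let mt := PySem.Str.upper model_type
  if db == mt then true
  else tcLoop db mt tcEquivalences

-- ===== PORT B =====
-- B: {i for i, pair in enumerate(equivalences) if any(t in s for t in pair)}
def tcGroups (s : String) : PySem.Set Int :=
  PySem.Set.ofList
    (((PySem.List.enumerate tcEquivalences).filter
        (fun ip => [ip.2.1, ip.2.2].any (fun t => PySem.Str.isIn t s))).map (·.1))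

def types_compatible_py_alt (db_type : String) (model_type : String) : Bool :=
  let db := PySem.Str.upper db_type
  let mt := PySem.Str.upper model_type
  if db == mt then true
  else !(PySem.Set.inter (tcGroups db) (tcGroups mt)).isEmpty

-- ===== PRECONDITION & SPEC =====
def Spec_types_compatible_py (db_type : String) (model_type : String) (out : Bool) : Prop := out = types_compatible_py_alt db_type model_type
instance (db_type : String) (model_type : String) (out : Bool) : Decidable (Spec_types_compatible_py db_type model_type out) := by unfold Spec_types_compatible_py; infer_instance

-- ===== CLAIM (what is proved, stated in full; the proofs are below) =====
def Claim_equal_types_compatible_py : Prop := ∀ (db_type : String) (model_type : String), Dom_types_compatible_py db_type model_type → Spec_types_compatible_py db_type model_type (types_compatible_py db_type model_type)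

-- ===== LEMMAS AND PROOFS =====

-- every string is a substring of itself
theorem tc_isIn_self (s : String) : PySem.Str.isIn s s = true :=
  (PySem.Str.isIn_iff_infix _ _).mpr (List.infix_refl _)

-- per-pair: the equality-membership disjunct is absorbed by the substring disjunct
theorem tc_pair_cond (db mt a b : String) :
    (((db == a || db == b) && (mt == a || mt == b))
      || ((PySem.Str.isIn a db || PySem.Str.isIn b db) && (PySem.Str.isIn a mt || PySem.Str.isIn b mt)))
    = ((PySem.Str.isIn a db || PySem.Str.isIn b db) && (PySem.Str.isIn a mt || PySem.Str.isIn b mt)) := by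
  have h : ∀ x t : String, (x == t) = true → PySem.Str.isIn t x = true := by
    intro x t hx
    rw [eq_of_beq hx]; exact tc_isIn_self t
  apply Bool.eq_iff_iff.mpr
  simp only [Bool.or_eq_true, Bool.and_eq_true]
  constructor
  · rintro (⟨hd, hm⟩ | hr)
    · exact ⟨hd.elim (fun x => Or.inl (h _ _ x)) (fun x => Or.inr (h _ _ x)),
             hm.elim (fun x => Or.inl (h _ _ x)) (fun x => Or.inr (h _ _ x))⟩
    · exact hr
  · exact Or.inr

-- A's loop is List.any of the per-pair condition
theorem tcLoop_eq_any (db mt : String) (l : List (String × String)) :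
    tcLoop db mt l
      = l.any (fun p => (PySem.Str.isIn p.1 db || PySem.Str.isIn p.2 db)
                        && (PySem.Str.isIn p.1 mt || PySem.Str.isIn p.2 mt)) := by
  induction l with
  | nil => rfl
  | cons p rest ih =>
    obtain ⟨a, b⟩ := p
    simp only [tcLoop, List.any_cons]
    rw [← tc_pair_cond db mt a b]
    split <;> simp_all

-- fst is injective on enumerate
theorem tc_enumerate_fst_inj {α : Type} (l : List α) (s : Int) (p q : Int × α)
    (hp : p ∈ PySem.List.enumerate l s) (hq : q ∈ PySem.List.enumerate l s)
    (hfst : p.1 = q.1) : p = q := by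
  rw [PySem.List.mem_enumerate_iff] at hp hq
  obtain ⟨k, hk, rfl⟩ := hp
  obtain ⟨k', hk', rfl⟩ := hq
  simp only at hfst
  have : (k : Int) = k' := by omega
  have : k = k' := by exact_mod_cast this
  subst this; rfl

-- membership in one group-index set
theorem tc_mem_groups (s : String) (x : Int) :
    x ∈ tcGroups s ↔ ∃ p ∈ PySem.List.enumerate tcEquivalences,
      (PySem.Str.isIn p.2.1 s || PySem.Str.isIn p.2.2 s) = true ∧ x = p.1 := by
  unfold tcGroups
  rw [PySem.Set.mem_ofList]
  simp only [List.mem_map, List.mem_filter, List.any_cons, List.any_nil, Bool.or_false]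
  constructor
  · rintro ⟨p, ⟨hm, hc⟩, rfl⟩; exact ⟨p, hm, hc, rfl⟩
  · rintro ⟨p, hm, hc, rfl⟩; exact ⟨p, ⟨hm, hc⟩, rfl⟩

-- main bridge: nonempty intersection of the two group-index sets = A's any-loop
theorem tc_inter_eq_any (db mt : String) :
    (!(PySem.Set.inter (tcGroups db) (tcGroups mt)).isEmpty)
      = tcLoop db mt tcEquivalences := by
  rw [tcLoop_eq_any]
  apply Bool.eq_iff_iff.mpr
  constructor
  · intro h
    have hne : PySem.Set.inter (tcGroups db) (tcGroups mt) ≠ [] := by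
      intro he; rw [he] at h; simp at h
    obtain ⟨x, hx⟩ := List.exists_mem_of_ne_nil _ hne
    obtain ⟨hxd, hxm⟩ := (PySem.Set.mem_inter _ _ _).mp hx
    obtain ⟨p, hpmem, hpd, hpx⟩ := (tc_mem_groups db x).mp hxd
    obtain ⟨q, hqmem, hqm, hqx⟩ := (tc_mem_groups mt x).mp hxm
    have hpq : p = q := tc_enumerate_fst_inj _ _ p q hpmem hqmem (by rw [← hpx, ← hqx])
    subst hpq
    rw [List.any_eq_true]
    refine ⟨p.2, ?_, by rw [Bool.and_eq_true]; exact ⟨hpd, hqm⟩⟩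
    rw [PySem.List.mem_enumerate_iff] at hpmem
    obtain ⟨k, hk, rfl⟩ := hpmem
    exact List.getElem_mem hk
  · intro h
    rw [List.any_eq_true] at h
    obtain ⟨p, hpmem, hpc⟩ := h
    obtain ⟨k, hk, rfl⟩ := List.mem_iff_getElem.mp hpmem
    simp only [Bool.and_eq_true] at hpc
    have henum : ((k : Int), tcEquivalences[k]) ∈ PySem.List.enumerate tcEquivalences := by
      rw [PySem.List.mem_enumerate_iff]
      exact ⟨k, hk, by simp⟩
    have hmemd : ((k : Int)) ∈ tcGroups db :=
      (tc_mem_groups db _).mpr ⟨(↑k, tcEquivalences[k]), henum, hpc.1, rfl⟩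
    have hmemm : ((k : Int)) ∈ tcGroups mt :=
      (tc_mem_groups mt _).mpr ⟨(↑k, tcEquivalences[k]), henum, hpc.2, rfl⟩
    have hmem : ((k : Int)) ∈ PySem.Set.inter (tcGroups db) (tcGroups mt) :=
      (PySem.Set.mem_inter _ _ _).mpr ⟨hmemd, hmemm⟩
    cases he : (PySem.Set.inter (tcGroups db) (tcGroups mt)).isEmpty
    · simp
    · rw [List.isEmpty_iff] at he; rw [he] at hmem; simp at hmem

-- ===== VERDICT (by name: the statement is the Claim_ definition above) =====
theorem types_compatible_py_spec : Claim_equal_types_compatible_py := by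
  intro db_type model_type _
  unfold Spec_types_compatible_py types_compatible_py types_compatible_py_alt
  simp only []
  split
  · rfl
  · exact (tc_inter_eq_any _ _).symm
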